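-- pv_equiv track=rewrite | github.com/vigge93/AoC | 2022/day25.py | part_1
-- ===== SOURCE A (Python) =====
-- SNAFU_TO_TEN = {'2': 2, '1': 1, '0': 0, '-': -1, '=': -2}
--
-- TEN_TO_SNAFU = {2: '2', 1: '1', 0: '0', -1: '-', -2: '='}
--
-- BASE = 5
--
-- def part_1(data):
--     s = sum(data)
--     r = ''
--     b = 1
--     while b <= s:
--         b *= BASE
--     b = b // 5
--     while b != 0:
--         cs = s // b
--         cs = max(cs, -2)
--         while cs > 2:
--             b *= 5
--             cr = SNAFU_TO_TEN[r[-1]]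
--             r = r[:-1]
--             s += b*cr
--             cs = cr + 1
--
--         r += str(TEN_TO_SNAFU[cs])
--         s -= b*cs
--         b //= 5
--     return r
-- ===== SOURCE B (Python) =====
-- TEN_TO_SNAFU = {2: '2', 1: '1', 0: '0', -1: '-', -2: '='}
--
-- def part_1(data):
--     s = sum(data)
--     r = ''
--     while s > 0:
--         d = (s + 2) % 5 - 2
--         r = TEN_TO_SNAFU[d] + r
--         s = (s - d) // 5
--     return r
-- ===== Notes on version B (the rewrite author's own statement) =====
-- stated objective: simpler
-- what changed: A converts the sum to SNAFU most-significant-digit first with a greedy guess plus backtracking (popping already-emitted characters and re-growing the base); B does the standard least-significant-first conversion with one balanced divmod per digit and no backtracking.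
-- crash fix: On every input whose sum s > 0 satisfies 2*s >= 5^len5(s) (e.g. [3], [13], [63]) A raises IndexError by backtracking below the empty string; B returns the SNAFU string of the sum (e.g. '1=' for [3]). — e.g. on part_1([3]): A raises IndexError, B returns "1="
import Mathlib
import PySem

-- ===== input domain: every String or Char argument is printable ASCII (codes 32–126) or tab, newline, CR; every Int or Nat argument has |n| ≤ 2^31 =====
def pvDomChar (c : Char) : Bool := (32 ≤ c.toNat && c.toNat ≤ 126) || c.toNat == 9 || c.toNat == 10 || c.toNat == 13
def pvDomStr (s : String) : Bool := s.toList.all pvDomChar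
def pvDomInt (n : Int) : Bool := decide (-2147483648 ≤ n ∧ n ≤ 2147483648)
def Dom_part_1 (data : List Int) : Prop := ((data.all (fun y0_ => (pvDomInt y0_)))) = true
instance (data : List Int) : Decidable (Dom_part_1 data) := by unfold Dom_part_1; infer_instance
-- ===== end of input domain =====

-- B replaces A's most-significant-first greedy conversion with backtracking (string pops) by the
-- plain least-significant-first balanced-divmod conversion: simpler, and total where A raises.

-- ===== PORT A =====
-- SNAFU_TO_TEN lookup; a missing key is a Python KeyError, unreachable on inputs admitted by Pre_ (default 0)
def snafuToTen (c : Char) : Int :=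
  if c = '2' then 2 else if c = '1' then 1 else if c = '0' then 0
  else if c = '-' then -1 else if c = '=' then -2 else 0

-- TEN_TO_SNAFU lookup; a missing key is a Python KeyError, unreachable on inputs admitted by Pre_ (default '?')
def tenToSnafu (n : Int) : Char :=
  if n = 2 then '2' else if n = 1 then '1' else if n = 0 then '0'
  else if n = -1 then '-' else if n = -2 then '=' else '?'

-- 'while b <= s: b *= BASE' (the 0 < b argument only certifies termination)
def growA (s b : Int) (hb : 0 < b) : Int :=
  if _h : b ≤ s then growA s (b * 5) (by omega) else b
termination_by (s + 1 - b).toNat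
decreasing_by omega

-- inner 'while cs > 2' loop; r[-1] on empty r is Python's IndexError (the none branch, unreachable
-- on inputs admitted by Pre_); r[:-1] = dropLast, exact for this slice
def innerA (s b : Int) (r : List Char) (cs : Int) : Int × Int × List Char × Int :=
  if 2 < cs then
    match h : r.getLast? with
    | none => (s, b, r, cs)
    | some c =>
      innerA (s + (b * 5) * snafuToTen c) (b * 5) r.dropLast (snafuToTen c + 1)
  else (s, b, r, cs)
termination_by r.length
decreasing_by
  have : r ≠ [] := by rintro rfl; simp at h
  simp [List.length_dropLast]; cases r <;> simp_all

-- outer 'while b != 0' loop; the fuel only certifies termination (proved sufficient on Pre_ inputs)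
def loopA (fuel : Nat) (s b : Int) (r : List Char) : List Char :=
  match fuel with
  | 0 => r
  | f + 1 =>
    if b ≠ 0 then
      match innerA s b r (max (PySem.Int.floordiv s b) (-2)) with
      | (s', b', r', cs) =>
          loopA f (s' - b' * cs) (PySem.Int.floordiv b' 5) (r' ++ [tenToSnafu cs])
    else r

def part_1 (data : List Int) : String :=
  let s := data.sum
  let b := growA s 1 (by omega)
  let b := PySem.Int.floordiv b 5
  String.ofList (loopA (10 * (s.toNat + 10) * (s.toNat + 10)) s b [])

-- ===== PORT B =====
-- TEN_TO_SNAFU lookup of Source B (its keys are always hit here)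
def tenToSnafuB (n : Int) : Char :=
  if n = 2 then '2' else if n = 1 then '1' else if n = 0 then '0'
  else if n = -1 then '-' else if n = -2 then '=' else '?'

-- 'while s > 0' loop of Source B, prepending digits least-significant first
def loopB (s : Int) (r : List Char) : List Char :=
  if _h : 0 < s then
    let d := PySem.Int.mod (s + 2) 5 - 2
    loopB (PySem.Int.floordiv (s - d) 5) (tenToSnafuB d :: r)
  else r
termination_by s.toNat
decreasing_by
  have h2 := PySem.Int.mod_nonneg (s + 2) (by omega : (0:Int) < 5)
  have h3 := PySem.Int.mod_lt (s + 2) (by omega : (0:Int) < 5)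
  rw [PySem.Int.floordiv_eq_ediv_of_pos (by omega)]
  omega

def part_1_alt (data : List Int) : String :=
  String.ofList (loopB data.sum [])

-- ===== PRECONDITION & SPEC =====
-- number of base-5 digits of n (structural fuel variant; the fuel argument is always ≥ n)
def len5F : Nat → Nat → Nat
  | 0, _ => 0
  | f + 1, n => if n = 0 then 0 else len5F f (n / 5) + 1

def len5 (n : Nat) : Nat := len5F n n

-- Pre_ excludes exactly the inputs on which A raises IndexError (it never returns there):
-- sums s > 0 whose SNAFU form needs more digits than their base-5 form, i.e. 2*s ≥ 5^len5(s).
def Pre_part_1 (data : List Int) : Prop := 2 * data.sum < 5 ^ (len5 data.sum.toNat)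
instance (data : List Int) : Decidable (Pre_part_1 data) := by unfold Pre_part_1; infer_instance

def pvWitness_part_1 : List Int := [8]

-- On every input with 5^len5(sum) ≤ 2*sum (e.g. [3]) A raises IndexError; B returns the SNAFU string of the sum.
def Raises_part_1 (data : List Int) : Prop := 5 ^ (len5 data.sum.toNat) ≤ 2 * data.sum
instance (data : List Int) : Decidable (Raises_part_1 data) := by unfold Raises_part_1; infer_instance
def pvRaiseWitness_part_1 : List Int := [3]
def pvRaiseWitnessOut_part_1 : String := "1="

def Spec_part_1 (data : List Int) (out : String) : Prop := out = part_1_alt data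
instance (data : List Int) (out : String) : Decidable (Spec_part_1 data out) := by unfold Spec_part_1; infer_instance

-- ===== CLAIM (what is proved, stated in full; the proofs are below) =====
def Claim_equal_part_1 : Prop := ∀ (data : List Int), Dom_part_1 data → Pre_part_1 data → Spec_part_1 data (part_1 data)
def Claim_raises_part_1 : Prop := (∀ (data : List Int), Dom_part_1 data → Raises_part_1 data → ¬ Pre_part_1 data) ∧ (Dom_part_1 (pvRaiseWitness_part_1) ∧ Raises_part_1 (pvRaiseWitness_part_1) ∧ part_1_alt (pvRaiseWitness_part_1) = pvRaiseWitnessOut_part_1)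

-- ===== LEMMAS AND PROOFS =====

-- ---- generic digit-string machinery ----

-- value of a most-significant-first SNAFU char string
def vM (l : List Char) : Int := l.foldl (fun a c => a * 5 + snafuToTen c) 0

-- value of a least-significant-first digit list
def vL : List Int → Int
  | [] => 0
  | d :: t => d + 5 * vL t

def charsOK (l : List Char) : Prop := ∀ c ∈ l, c = '2' ∨ c = '1' ∨ c = '0' ∨ c = '-' ∨ c = '='
def headOK (l : List Char) : Prop := ∀ c, l.head? = some c → 1 ≤ snafuToTen c
def digitsOK (l : List Int) : Prop := ∀ d ∈ l, -2 ≤ d ∧ d ≤ 2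
def lastNZ (l : List Int) : Prop := ∀ d, l.getLast? = some d → d ≠ 0

theorem snafu_round1 (n : Int) (h1 : -2 ≤ n) (h2 : n ≤ 2) : snafuToTen (tenToSnafu n) = n := by
  interval_cases n <;> rfl

theorem snafu_round2 (c : Char) (h : c = '2' ∨ c = '1' ∨ c = '0' ∨ c = '-' ∨ c = '=') :
    tenToSnafuB (snafuToTen c) = c := by
  rcases h with rfl | rfl | rfl | rfl | rfl <;> rfl

theorem snafu_digit_bounds (c : Char) : -2 ≤ snafuToTen c ∧ snafuToTen c ≤ 2 := by
  unfold snafuToTen; split_ifs <;> omega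

theorem tenToSnafu_alpha (n : Int) (h1 : -2 ≤ n) (h2 : n ≤ 2) :
    tenToSnafu n = '2' ∨ tenToSnafu n = '1' ∨ tenToSnafu n = '0' ∨ tenToSnafu n = '-' ∨ tenToSnafu n = '=' := by
  interval_cases n <;> simp [tenToSnafu]

theorem vM_append (l : List Char) (c : Char) : vM (l ++ [c]) = vM l * 5 + snafuToTen c := by
  simp [vM, List.foldl_append]

theorem vM_vL (l : List Char) : vL ((l.map snafuToTen).reverse) = vM l := by
  induction l using List.reverseRecOn with
  | nil => simp [vM, vL]
  | append_singleton l c ih => simp [vM_append, vL, ← ih]; ring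

theorem getLast?_cons_ne {α : Type} (a : α) (l : List α) (h : l ≠ []) :
    (a :: l).getLast? = l.getLast? := by
  cases l with
  | nil => exact absurd rfl h
  | cons b t => exact List.getLast?_cons_cons

theorem lastNZ_tail (d : Int) (t : List Int) (h : lastNZ (d :: t)) (ht : t ≠ []) : lastNZ t := by
  intro x hx; apply h; rwa [getLast?_cons_ne _ _ ht]

theorem vL_nz (l : List Int) (h : digitsOK l) (h2 : lastNZ l) (h3 : l ≠ []) : vL l ≠ 0 := by
  induction l with
  | nil => exact absurd rfl h3
  | cons d t ih =>
    cases t with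
    | nil =>
      have := h2 d (by simp)
      simp [vL]; omega
    | cons e t' =>
      have hnz : vL (e :: t') ≠ 0 :=
        ih (fun x hx => h x (List.mem_cons_of_mem _ hx)) (lastNZ_tail _ _ h2 (by simp)) (by simp)
      obtain ⟨hd1, hd2⟩ := h d List.mem_cons_self
      simp only [vL] at *
      omega

-- a SNAFU digit list (least-significant first, no trailing zero) is unique for its value
theorem vL_uniq (l1 : List Int) : ∀ l2, digitsOK l1 → digitsOK l2 → lastNZ l1 → lastNZ l2 →
    vL l1 = vL l2 → l1 = l2 := by
  induction l1 with
  | nil =>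
    intro l2 _ h2 _ h4 hv
    by_contra hne
    exact vL_nz l2 h2 h4 (fun e => hne (e ▸ rfl)) (by simp [vL] at hv; omega)
  | cons d t ih =>
    intro l2 h1 h2 h3 h4 hv
    cases l2 with
    | nil =>
      exact absurd (show vL (d :: t) = 0 by simpa [vL] using hv) (vL_nz (d :: t) h1 h3 (by simp))
    | cons e u =>
      obtain ⟨hd1, hd2⟩ := h1 d List.mem_cons_self
      obtain ⟨he1, he2⟩ := h2 e List.mem_cons_self
      simp only [vL] at hv
      have hde : d = e ∧ vL t = vL u := by constructor <;> omega
      obtain ⟨rfl, hveq⟩ := hde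
      have htu : t = u := by
        by_cases ht : t = []
        · subst ht
          by_cases hu : u = []
          · rw [hu]
          · exact absurd (show vL u = 0 by simp [vL] at hveq; omega)
              (vL_nz u (fun z hz => h2 z (List.mem_cons_of_mem _ hz)) (lastNZ_tail _ _ h4 hu) hu)
        · by_cases hu : u = []
          · exact absurd (show vL t = 0 by subst hu; simp [vL] at hveq; omega)
              (vL_nz t (fun z hz => h1 z (List.mem_cons_of_mem _ hz)) (lastNZ_tail _ _ h3 ht) ht)
          · exact ih u (fun z hz => h1 z (List.mem_cons_of_mem _ hz))
              (fun z hz => h2 z (List.mem_cons_of_mem _ hz))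
              (lastNZ_tail _ _ h3 ht) (lastNZ_tail _ _ h4 hu) hveq
      rw [htu]

-- ---- characterisation of B ----

theorem loopB_lem (n : Nat) : ∀ (s : Int) (acc : List Char), s.toNat = n → 0 ≤ s →
    ∃ dl : List Int, loopB s acc = (dl.map tenToSnafuB).reverse ++ acc ∧ vL dl = s ∧
      digitsOK dl ∧ lastNZ dl ∧ (dl = [] ↔ s = 0) := by
  induction n using Nat.strong_induction_on with
  | _ n ih =>
    intro s acc hn hs
    by_cases hpos : 0 < s
    · have h2 := PySem.Int.mod_nonneg (s + 2) (by omega : (0:Int) < 5)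
      have h3 := PySem.Int.mod_lt (s + 2) (by omega : (0:Int) < 5)
      have hdvd : PySem.Int.mod (s + 2) 5 = (s + 2) % 5 := PySem.Int.mod_eq_emod_of_pos (by omega)
      obtain ⟨d, hd⟩ : ∃ d, PySem.Int.mod (s + 2) 5 - 2 = d := ⟨_, rfl⟩
      have hdb : -2 ≤ d ∧ d ≤ 2 := by omega
      have hfd : PySem.Int.floordiv (s - d) 5 = (s - d) / 5 := PySem.Int.floordiv_eq_ediv_of_pos (by omega)
      obtain ⟨s', hs'⟩ : ∃ x, PySem.Int.floordiv (s - d) 5 = x := ⟨_, rfl⟩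
      have hquot : (s - d) / 5 = s' := by rw [← hfd, hs']
      have hss' : s = 5 * s' + d := by omega
      have hs'lt : s'.toNat < n ∧ 0 ≤ s' := by omega
      obtain ⟨dl', hB, hv, hok, hnz, hnil⟩ := ih s'.toNat hs'lt.1 s' (tenToSnafuB d :: acc) rfl hs'lt.2
      refine ⟨d :: dl', ?_, by simp [vL, hv]; omega, ?_, ?_, by simp; omega⟩
      · rw [loopB]; simp only [dif_pos hpos]; rw [hd, hs', hB]; simp
      · intro x hx; rcases List.mem_cons.mp hx with rfl | hx
        · omega
        · exact hok x hx
      · intro x hx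
        by_cases hdl : dl' = []
        · subst hdl; simp at hx; have : s' = 0 := hnil.mp rfl; omega
        · rw [getLast?_cons_ne _ _ hdl] at hx
          exact hnz x hx
    · have : s = 0 := by omega
      refine ⟨[], by rw [loopB]; simp [hpos], by simp [vL, this], by simp [digitsOK],
        by simp [lastNZ], by simp [this]⟩

-- ---- characterisation of A ----

theorem growLem (s b : Int) (hb : 0 < b) :
    s < growA s b hb ∧ (∃ k : Nat, growA s b hb = b * 5 ^ k) ∧ (b ≤ s → growA s b hb ≤ 5 * s) ∧
    b ≤ growA s b hb ∧ (¬ b ≤ s → growA s b hb = b) := by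
  fun_induction growA s b hb with
  | case1 b hb h ih =>
    obtain ⟨h1, ⟨k, hk⟩, h3, h4, h5⟩ := ih
    refine ⟨h1, ⟨k+1, by rw [hk]; ring⟩, fun _ => ?_, by omega, by omega⟩
    by_cases h6 : b * 5 ≤ s
    · exact h3 h6
    · rw [h5 h6]; omega
  | case2 b hb h => exact ⟨by omega, ⟨0, by ring⟩, by omega, le_refl _, fun _ => rfl⟩

theorem headOK_dropLast (r : List Char) (h : headOK r) : headOK r.dropLast := by
  cases r with
  | nil => exact h
  | cons x t =>
    cases t with
    | nil => intro c hc; simp at hc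
    | cons y u => intro c hc; exact h c (by simpa using hc)

theorem charsOK_dropLast (r : List Char) (h : charsOK r) : charsOK r.dropLast :=
  fun c hc => h c (List.dropLast_subset _ hc)

-- the inner backtracking loop, under the loop invariant of the outer loop
theorem inner_lem (K : Nat) (T : Int) (hK : 2 * T < 5 ^ K) :
    ∀ (s b : Int) (r : List Char) (cs : Int), ∀ j : Nat,
    b = 5 ^ j → j + 1 + r.length = K → T = vM r * (5 * b) + s → charsOK r → headOK r →
    5 * b < 2 * s → s < 10 * b → 2 < cs →
    ∃ (s' b' : Int) (r' : List Char) (cs' : Int) (j' : Nat),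
      innerA s b r cs = (s', b', r', cs') ∧ b' = 5 ^ j' ∧ 1 ≤ j' ∧ j' + 1 + r'.length = K ∧
      T = vM r' * (5 * b') + s' ∧ charsOK r' ∧ headOK r' ∧
      -1 ≤ cs' ∧ cs' ≤ 2 ∧
      -(b' - 1) ≤ 2 * (s' - b' * cs') ∧ s' - b' * cs' < b' ∧
      (r' = [] → 1 ≤ cs') ∧
      2 * s' - 2 * b' * cs' + b' = 2 * s - 5 * b := by
  intro s b r cs
  fun_induction innerA s b r cs with
  | case1 s b r cs hcs hnone =>
    intro j hb hlen hT hchars hhead hlo hhi _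
    exfalso
    have hr : r = [] := by simpa using hnone
    subst hr
    simp [vM] at hT hlen
    have : (5:Int) ^ K = 5 * 5 ^ j := by rw [← hlen]; ring
    rw [hb] at hlo
    omega
  | case2 s b r cs hcs c hsome ih =>
    intro j hb hlen hT hchars hhead hlo hhi _
    have hrne : r ≠ [] := by rintro rfl; simp at hsome
    have hbpos : (0:Int) < b := hb ▸ pow_pos (by omega) j
    have hc : r.getLast hrne = c := by
      have := List.getLast?_eq_some_getLast (l := r) hrne
      rw [hsome] at this; exact (Option.some_inj.mp this).symm
    have hdec : r.dropLast ++ [c] = r := by rw [← hc]; exact List.dropLast_append_getLast hrne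
    have hdb := snafu_digit_bounds c
    have hvr : vM r = vM r.dropLast * 5 + snafuToTen c := by rw [← hdec, vM_append]; rw [hdec]
    have hlen' : r.dropLast.length = r.length - 1 := List.length_dropLast
    have hrlen : 1 ≤ r.length := List.length_pos_iff.mpr hrne
    have hchars' := charsOK_dropLast r hchars
    have hhead' := headOK_dropLast r hhead
    by_cases hd2 : snafuToTen c = 2
    · -- the popped digit is 2: the cascade continues
      obtain ⟨s', b', r', cs', j', heq, hpost⟩ :=
        ih (j + 1) (by rw [hb]; ring) (by omega)
          (by rw [hT, hvr]; ring) hchars' hhead'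
          (by nlinarith) (by nlinarith) (by omega)
      exact ⟨s', b', r', cs', j', heq, hpost.1, hpost.2.1, hpost.2.2.1, hpost.2.2.2.1,
        hpost.2.2.2.2.1, hpost.2.2.2.2.2.1, hpost.2.2.2.2.2.2.1, hpost.2.2.2.2.2.2.2.1,
        hpost.2.2.2.2.2.2.2.2.1, hpost.2.2.2.2.2.2.2.2.2.1, hpost.2.2.2.2.2.2.2.2.2.2.1,
        by have := hpost.2.2.2.2.2.2.2.2.2.2.2; rw [this]; rw [hd2]; ring⟩
    · -- the popped digit is ≤ 1: one more step, then the recursive call returns at once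
      have hstop : ¬ 2 < snafuToTen c + 1 := by omega
      refine ⟨s + (b*5) * snafuToTen c, b*5, r.dropLast, snafuToTen c + 1, j + 1,
        by rw [innerA, if_neg hstop], by rw [hb]; ring, by omega, by omega,
        by rw [hT, hvr]; ring, hchars', hhead', by omega, by omega,
        by nlinarith, by nlinarith, ?_, by ring⟩
      intro hnil
      have : r = [c] := by rw [← hdec, hnil]; rfl
      have hh := hhead c (by rw [this]; rfl)
      omega
  | case3 s b r cs hcs =>
    intro j hb hlen hT hchars hhead hlo hhi h
    exact absurd h hcs

theorem charsOK_push (r : List Char) (c : Char)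
    (h : charsOK r) (hc : c = '2' ∨ c = '1' ∨ c = '0' ∨ c = '-' ∨ c = '=') :
    charsOK (r ++ [c]) := by
  intro x hx
  rcases List.mem_append.mp hx with hx | hx
  · exact h x hx
  · simp at hx; subst hx; exact hc

theorem headOK_push (r : List Char) (c : Char)
    (h : headOK r) (hc : r = [] → 1 ≤ snafuToTen c) : headOK (r ++ [c]) := by
  cases r with
  | nil => intro x hx; simp at hx; subst hx; exact hc rfl
  | cons y t => intro x hx; exact h x (by simpa using hx)

theorem loopA_zero (f : Nat) (s : Int) (r : List Char) : loopA f s 0 r = r := by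
  cases f <;> simp [loopA]

-- the outer loop computes the (unique, by vL_uniq) SNAFU digit string of T
theorem outer_lem (K : Nat) (T : Int) (hK : 2 * T < 5 ^ K) :
    ∀ (fuel : Nat) (s b : Int) (r : List Char) (j : Nat),
    (2 * s + 5 * b).toNat * (K + 2) + j + 1 ≤ fuel →
    b = 5 ^ j → j + 1 + r.length = K → T = vM r * (5 * b) + s → charsOK r → headOK r →
    -(5 * b - 1) ≤ 2 * s → s < 5 * b → (r = [] → b ≤ s) →
    (loopA fuel s b r).length = K ∧ charsOK (loopA fuel s b r) ∧ headOK (loopA fuel s b r) ∧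
      vM (loopA fuel s b r) = T := by
  intro fuel
  induction fuel with
  | zero => intro s b r j hμ; omega
  | succ f ih =>
    intro s b r j hμ hb hlen hT hchars hhead hlo hhi hemp
    subst hb
    have hbpos : (0:Int) < 5 ^ j := pow_pos (by omega) j
    have hbne : (5:Int) ^ j ≠ 0 := by omega
    rw [loopA, if_pos hbne]
    have hfd := PySem.Int.floordiv_mul_add_mod s (5 ^ j)
    have hmd0 := PySem.Int.mod_nonneg s hbpos
    have hmdlt := PySem.Int.mod_lt s hbpos
    by_cases hcs : 2 < max (PySem.Int.floordiv s (5 ^ j)) (-2)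
    · -- backtracking happens
      have h3 : 3 ≤ PySem.Int.floordiv s (5 ^ j) := by omega
      have h3b : 3 * 5 ^ j ≤ s := (PySem.Int.le_floordiv_iff_mul_le hbpos).mp h3
      obtain ⟨s', b', r', cs', j', heq, hb', hj'1, hlen', hT', hchars', hhead',
          hcs'lo, hcs'hi, hplo, hphi, hempcs, hmeas⟩ :=
        inner_lem K T hK s (5 ^ j) r (max (PySem.Int.floordiv s (5 ^ j)) (-2)) j rfl hlen hT
          hchars hhead (by omega) (by omega) hcs
      rw [heq]; dsimp only
      obtain ⟨j0, rfl⟩ : ∃ j0, j' = j0 + 1 := ⟨j' - 1, by omega⟩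
      have hb'e : b' = 5 * 5 ^ j0 := by rw [hb', pow_succ]; ring
      subst hb'e
      have hb0pos : (0:Int) < 5 ^ j0 := pow_pos (by omega) j0
      have hb'' : PySem.Int.floordiv (5 * 5 ^ j0) 5 = 5 ^ j0 := by
        rw [PySem.Int.floordiv_eq_ediv_of_pos (by omega)]
        exact Int.mul_ediv_cancel_left _ (by omega)
      rw [hb'']
      have hround := snafu_round1 cs' (by omega) hcs'hi
      apply ih _ _ _ j0 _ rfl (by simp; omega)
        (by rw [vM_append, hround, hT']; ring)
        (charsOK_push _ _ hchars' (tenToSnafu_alpha cs' (by omega) hcs'hi))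
        (headOK_push _ _ hhead' (fun h => by rw [snafu_round1 cs' (by omega) hcs'hi]; exact hempcs h))
        (by omega) (by omega) (by simp)
      -- the potential decreases by at least 10*(K+2)
      have hint : 2 * (s' - 5 * 5 ^ j0 * cs') + 5 * 5 ^ j0 = 2 * s - 5 * 5 ^ j := by
        linear_combination hmeas
      have hm1 : (2 * (s' - 5 * 5 ^ j0 * cs') + 5 * 5 ^ j0).toNat + 10 ≤ (2 * s + 5 * 5 ^ j).toNat := by
        omega
      have hj0K : j0 + 1 ≤ K - 1 := by omega
      have hKpos : 1 ≤ K := by omega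
      have := Nat.mul_le_mul_right (K + 2) hm1
      nlinarith [this, hμ]
    · -- no backtracking: innerA returns its input state
      have heq : innerA s (5 ^ j) r (max (PySem.Int.floordiv s (5 ^ j)) (-2)) =
          (s, 5 ^ j, r, max (PySem.Int.floordiv s (5 ^ j)) (-2)) := by
        rw [innerA, if_neg hcs]
      rw [heq]; dsimp only
      obtain ⟨cs1, hcs1⟩ : ∃ x, max (PySem.Int.floordiv s (5 ^ j)) (-2) = x := ⟨_, rfl⟩
      rw [hcs1]
      have hcs1lo : -2 ≤ cs1 := by rw [← hcs1]; exact le_max_right _ _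
      have hcs1hi : cs1 ≤ 2 := by omega
      have hround := snafu_round1 cs1 hcs1lo hcs1hi
      have hplo : -(5 ^ j - 1) ≤ 2 * (s - 5 ^ j * cs1) ∧ s - 5 ^ j * cs1 < 5 ^ j := by
        by_cases hcl : -2 ≤ PySem.Int.floordiv s (5 ^ j)
        · have : cs1 = PySem.Int.floordiv s (5 ^ j) := by rw [← hcs1, max_eq_left hcl]
          subst this
          constructor
          · nlinarith [hfd, hmd0]
          · nlinarith [hfd, hmdlt]
        · have hfd3 : PySem.Int.floordiv s (5 ^ j) ≤ -3 := by omega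
          have : cs1 = -2 := by rw [← hcs1, max_eq_right (by omega)]
          subst this
          have hsle : s ≤ -2 * 5 ^ j - 1 := by nlinarith [hfd, hmdlt]
          constructor <;> nlinarith
      have hemp1 : r = [] → 1 ≤ cs1 := by
        intro hnil
        have h1 : 1 * 5 ^ j ≤ s := by simpa using hemp hnil
        have := (PySem.Int.le_floordiv_iff_mul_le hbpos).mpr h1
        omega
      cases j with
      | zero =>
        simp only [pow_zero] at *
        have hb0 : PySem.Int.floordiv (1:Int) 5 = 0 := by decide
        rw [hb0, loopA_zero]
        have hs1 : PySem.Int.floordiv s 1 = s := by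
          rw [PySem.Int.floordiv_eq_ediv_of_pos (by omega)]; exact Int.ediv_one s
        have hcse : cs1 = s := by rw [← hcs1, hs1]; omega
        refine ⟨by simp; omega, charsOK_push _ _ hchars (tenToSnafu_alpha cs1 hcs1lo hcs1hi),
          headOK_push _ _ hhead (fun h => by rw [hround]; exact hemp1 h), ?_⟩
        rw [vM_append, hround, hcse, hT]; ring
      | succ j0 =>
        have hsucc : (5:Int) ^ (j0 + 1) = 5 * 5 ^ j0 := by rw [pow_succ]; ring
        rw [hsucc] at hμ hT hlo hhi hemp hfd hmd0 hmdlt hcs1 hplo ⊢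
        have hb0pos : (0:Int) < 5 ^ j0 := pow_pos (by omega) j0
        have hb'' : PySem.Int.floordiv (5 * 5 ^ j0) 5 = 5 ^ j0 := by
          rw [PySem.Int.floordiv_eq_ediv_of_pos (by omega)]
          exact Int.mul_ediv_cancel_left _ (by omega)
        rw [hb'']
        apply ih _ _ _ j0 _ rfl (by simp; omega)
          (by rw [vM_append, hround, hT]; ring)
          (charsOK_push _ _ hchars (tenToSnafu_alpha cs1 hcs1lo hcs1hi))
          (headOK_push _ _ hhead (fun h => by rw [hround]; exact hemp1 h))
          (by omega) (by omega) (by simp)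
        -- the potential decreases
        have hup : 2 * (s - 5 * 5 ^ j0 * cs1) + 5 * 5 ^ j0 ≤ 2 * s + 5 * (5 * 5 ^ j0) := by
          nlinarith
        have hlo2 : 0 ≤ 2 * (s - 5 * 5 ^ j0 * cs1) + 5 * 5 ^ j0 := by omega
        have hm1 : (2 * (s - 5 * 5 ^ j0 * cs1) + 5 * 5 ^ j0).toNat ≤ (2 * s + 5 * (5 * 5 ^ j0)).toNat := by
          omega
        have := Nat.mul_le_mul_right (K + 2) hm1
        omega

-- ---- the number of base-5 digits ----

theorem len5F_zero (f : Nat) : len5F f 0 = 0 := by cases f <;> simp [len5F]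

theorem len5F_sand : ∀ f n, 0 < n → n ≤ f →
    1 ≤ len5F f n ∧ 5 ^ (len5F f n - 1) ≤ n ∧ n < 5 ^ (len5F f n) := by
  intro f
  induction f with
  | zero => intro n h1 h2; omega
  | succ f ih =>
    intro n h1 h2
    simp only [len5F, if_neg (by omega : ¬ n = 0)]
    by_cases hq : n / 5 = 0
    · rw [hq, len5F_zero]
      norm_num; omega
    · obtain ⟨hL1, hL2, hL3⟩ := ih (n / 5) (by omega) (by omega)
      obtain ⟨t, ht⟩ : ∃ t, len5F f (n / 5) = t + 1 := ⟨_, (Nat.succ_pred_eq_of_pos hL1).symm⟩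
      rw [ht] at hL2 hL3 ⊢
      refine ⟨by omega, ?_, ?_⟩
      · simp only [Nat.add_sub_cancel] at hL2 ⊢
        calc 5 ^ (t + 1) = 5 * 5 ^ t := by ring
        _ ≤ 5 * (n / 5) := by omega
        _ ≤ n := by omega
      · have : (5:Nat) ^ (t + 1 + 1) = 5 * 5 ^ (t + 1) := by ring
        omega

theorem pow5_unique (a b n : Nat) (ha : 1 ≤ a) (hb : 1 ≤ b)
    (h1 : 5 ^ (a - 1) ≤ n) (h2 : n < 5 ^ a) (h3 : 5 ^ (b - 1) ≤ n) (h4 : n < 5 ^ b) : a = b := by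
  rcases Nat.lt_trichotomy a b with h | h | h
  · exfalso
    have : (5:Nat) ^ a ≤ 5 ^ (b - 1) := Nat.pow_le_pow_right (by omega) (by omega)
    omega
  · exact h
  · exfalso
    have : (5:Nat) ^ b ≤ 5 ^ (a - 1) := Nat.pow_le_pow_right (by omega) (by omega)
    omega

-- ===== VERDICT (by name: the statement is the Claim_ definition above) =====

theorem part_1_spec : Claim_equal_part_1 := by
  intro data _ hpre
  rw [Pre_part_1] at hpre
  unfold Spec_part_1 part_1 part_1_alt
  dsimp only
  obtain ⟨s, hsum⟩ : ∃ x, data.sum = x := ⟨_, rfl⟩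
  rw [hsum] at hpre ⊢
  by_cases hs : s ≤ 0
  · -- nonpositive sum: both return ""
    obtain ⟨_, _, _, _, hgrow1⟩ := growLem s 1 (by omega)
    rw [hgrow1 (by omega), (by decide : PySem.Int.floordiv (1:Int) 5 = 0), loopA_zero,
      (by rw [loopB]; rw [dif_neg (by omega)] : loopB s [] = [])]
  · -- positive sum
    rw [not_le] at hs
    obtain ⟨hgt, ⟨k, hgk⟩, hg5s, hg1, _⟩ := growLem s 1 (by omega)
    rw [hgk] at hgt hg5s
    simp only [one_mul] at hgt hg5s
    have hk1 : 1 ≤ k := by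
      rcases Nat.eq_zero_or_pos k with rfl | h
      · simp at hgt; omega
      · exact h
    obtain ⟨k0, rfl⟩ : ∃ k0, k = k0 + 1 := ⟨k - 1, by omega⟩
    have hkpow : (5:Int) ^ (k0 + 1) = 5 * 5 ^ k0 := by rw [pow_succ]; ring
    have hb0pos : (0:Int) < 5 ^ k0 := pow_pos (by omega) k0
    have hfb : PySem.Int.floordiv ((5:Int) ^ (k0 + 1)) 5 = 5 ^ k0 := by
      rw [hkpow, PySem.Int.floordiv_eq_ediv_of_pos (by omega)]
      exact Int.mul_ediv_cancel_left _ (by omega)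
    have hlow : (5:Int) ^ k0 ≤ s := by
      have := hg5s (by omega)
      rw [hkpow] at this; omega
    -- identify k0+1 with len5 s.toNat, so that Pre_ gives 2*s < 5^(k0+1)
    have hsn : ((s.toNat : Int)) = s := Int.toNat_of_nonneg (by omega)
    have hcastl : ((5 ^ k0 : Nat) : Int) = (5:Int) ^ k0 := by push_cast; ring
    have hcasth : ((5 ^ (k0+1) : Nat) : Int) = (5:Int) ^ (k0+1) := by push_cast; ring
    obtain ⟨hl1, hl2, hl3⟩ := len5F_sand s.toNat s.toNat (by omega) (le_refl _)
    have hlen5 : len5 s.toNat = k0 + 1 := by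
      refine pow5_unique _ _ s.toNat hl1 (by omega) hl2 hl3 ?_ ?_
      · simp only [Nat.add_sub_cancel]; omega
      · omega
    rw [hlen5] at hpre
    -- rewrite A's initial base into 5^k0
    rw [hgk]
    simp only [one_mul]
    rw [hfb]
    rw [hkpow] at hgt
    -- sufficient fuel
    have hpow : (5:Nat) ^ k0 ≤ s.toNat := by omega
    have hkn : k0 < s.toNat := by
      have hself : k0 < 5 ^ k0 := Nat.lt_pow_self (by omega)
      omega
    have hM : (2 * s + 5 * 5 ^ k0).toNat ≤ 7 * s.toNat := by omega
    have hfuel : (2 * s + 5 * 5 ^ k0).toNat * ((k0 + 1) + 2) + k0 + 1 ≤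
        10 * (s.toNat + 10) * (s.toNat + 10) := by
      have h1 : (2 * s + 5 * 5 ^ k0).toNat * ((k0 + 1) + 2) ≤ (7 * s.toNat) * (s.toNat + 3) :=
        Nat.mul_le_mul hM (by omega)
      nlinarith [h1, hkn]
    -- A computes a SNAFU digit string of value s
    obtain ⟨hXlen, hXchars, hXhead, hXval⟩ :=
      outer_lem (k0 + 1) s hpre (10 * (s.toNat + 10) * (s.toNat + 10)) s (5 ^ k0) [] k0
        hfuel rfl (by simp) (by simp [vM]) (by intro c hc; simp at hc)
        (by intro c hc; simp at hc) (by omega) (by omega : s < 5 * 5 ^ k0) (fun _ => hlow)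
    -- B computes a SNAFU digit list of value s
    obtain ⟨dlB, hB, hvB, hokB, hnzB, _⟩ := loopB_lem s.toNat s [] rfl (by omega)
    rw [hB, List.append_nil]
    obtain ⟨X, hX⟩ : ∃ x, loopA (10 * (s.toNat + 10) * (s.toNat + 10)) s (5 ^ k0) [] = x := ⟨_, rfl⟩
    rw [hX] at hXlen hXchars hXhead hXval ⊢
    -- uniqueness: the two digit lists agree
    have hXne : X ≠ [] := by intro h; rw [h] at hXlen; simp at hXlen
    have hdigA : digitsOK ((X.map snafuToTen).reverse) := by
      intro d hd
      simp only [List.mem_reverse, List.mem_map] at hd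
      obtain ⟨c, _, rfl⟩ := hd
      exact snafu_digit_bounds c
    have hnzA : lastNZ ((X.map snafuToTen).reverse) := by
      intro d hd
      rw [List.getLast?_reverse, List.head?_map] at hd
      cases hXh : X.head? with
      | none => rw [hXh] at hd; simp at hd
      | some c0 =>
        rw [hXh] at hd
        simp only [Option.map_some] at hd
        have hd' : snafuToTen c0 = d := Option.some_inj.mp hd
        have := hXhead c0 hXh
        omega
    have hvA : vL ((X.map snafuToTen).reverse) = s := by rw [vM_vL, hXval]
    have huniq : (X.map snafuToTen).reverse = dlB :=
      vL_uniq _ dlB hdigA hokB hnzA hnzB (by rw [hvA, hvB])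
    have h1 : X.map snafuToTen = dlB.reverse := by rw [← huniq, List.reverse_reverse]
    have hXeq : X = (dlB.map tenToSnafuB).reverse := by
      rw [← List.map_reverse, ← h1, List.map_map]
      have hid := List.map_congr_left (l := X) (f := tenToSnafuB ∘ snafuToTen) (g := id)
        (fun c hc => snafu_round2 c (hXchars c hc))
      exact ((hid.trans (List.map_id X))).symm
    rw [hXeq]

theorem part_1_raises : Claim_raises_part_1 := by
  unfold Claim_raises_part_1
  refine ⟨?_, by decide, by decide, ?_⟩
  · intro data _ hR
    rw [Raises_part_1] at hR
    rw [Pre_part_1]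
    omega
  · show String.ofList (loopB (List.sum [(3:Int)]) []) = "1="
    have hsum : List.sum [(3:Int)] = 3 := by simp
    have e1 : loopB 3 [] = loopB 1 ['='] := by
      rw [loopB, dif_pos (by decide : (0:Int) < 3)]
      rw [show PySem.Int.mod ((3:Int) + 2) 5 - 2 = -2 from by decide]
      show loopB (PySem.Int.floordiv (3 - -2) 5) [tenToSnafuB (-2)] = loopB 1 ['=']
      rw [show PySem.Int.floordiv ((3:Int) - -2) 5 = 1 from by decide]
      rfl
    have e2 : loopB 1 ['='] = loopB 0 ['1', '='] := by
      rw [loopB, dif_pos (by decide : (0:Int) < 1)]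
      rw [show PySem.Int.mod ((1:Int) + 2) 5 - 2 = 1 from by decide]
      show loopB (PySem.Int.floordiv (1 - 1) 5) [tenToSnafuB 1, '='] = loopB 0 ['1', '=']
      rw [show PySem.Int.floordiv ((1:Int) - 1) 5 = 0 from by decide]
      rfl
    have e3 : loopB 0 ['1', '='] = ['1', '='] := by
      rw [loopB, dif_neg (by decide : ¬ (0:Int) < 0)]
    rw [hsum, e1, e2, e3]

-- self-check that the two witness facts of the crash-fix claim are available by name
theorem pvRaiseWitness_ok :
    Raises_part_1 pvRaiseWitness_part_1 ∧
      part_1_alt pvRaiseWitness_part_1 = pvRaiseWitnessOut_part_1 :=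
  ⟨part_1_raises.2.2.1, part_1_raises.2.2.2⟩
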